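-- pv_equiv track=rewrite | github.com/jramaswami/Binary_Search_Python | palindrome_splitting.py | solve
-- ===== SOURCE A (Python) =====
-- from functools import cache
--
-- def solve(s):
--
--     @cache
--     def is_palindrome(left, right):
--         "Return True if s[left:right+1] is a palindrome."
--         if left >= right:
--             return True
--
--         if s[left] == s[right]:
--             return is_palindrome(left + 1, right - 1)
--
--         return False
--
--     def solve0(left):
--         if left >= len(s):
--             return 1
--
--         result = 0
--         for right in range(left, len(s)):
--             if is_palindrome(left, right):
--                 result += solve0(right+1)
--         return result
--
--     return solve0(0)
-- ===== SOURCE B (Python) =====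
-- def solve(s):
--     # Bottom-up DP: dp holds the partition counts for suffixes s[i:], built back to front.
--     n = len(s)
--     dp = [1]  # count for the empty suffix s[n:]
--     for k in range(n):
--         i = n - 1 - k
--         total = 0
--         for j in range(i, n):
--             sub = s[i:j + 1]
--             if sub == sub[::-1]:
--                 total += dp[j - i]
--         dp = [total] + dp
--     return dp[0]
-- ===== Notes on version B (the rewrite author's own statement) =====
-- stated objective: faster
-- what changed: Replaces A's exponential top-down recursion solve0 with a bottom-up DP over suffixes (a list of counts built back to front), checking palindromes by slice-vs-reversed-slice.
import Mathlib
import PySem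

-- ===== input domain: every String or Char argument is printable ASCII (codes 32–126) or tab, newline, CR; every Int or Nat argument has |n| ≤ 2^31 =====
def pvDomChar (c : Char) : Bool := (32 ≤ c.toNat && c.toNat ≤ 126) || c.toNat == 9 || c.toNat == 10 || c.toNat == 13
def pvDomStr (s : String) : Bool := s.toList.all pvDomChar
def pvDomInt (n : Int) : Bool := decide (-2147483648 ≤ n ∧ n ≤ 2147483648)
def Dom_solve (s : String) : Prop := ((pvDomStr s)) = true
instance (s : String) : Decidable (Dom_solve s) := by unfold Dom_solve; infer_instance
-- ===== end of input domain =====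

-- B replaces A's exponential top-down recursion with a bottom-up DP list of suffix counts (objective: faster).

-- ===== PORT A =====
-- is_palindrome(left, right); the indices are always in range where read (left < right < len s),
-- so List.getD is exact there.
def isPalA (cs : List Char) (l r : Nat) : Bool :=
  if l ≥ r then true
  else if cs.getD l ' ' == cs.getD r ' ' then isPalA cs (l + 1) (r - 1)
  else false
termination_by r - l
decreasing_by omega

-- solve0(left): the for-loop over range(left, len(s)) as a foldl over the same range
def solve0A (cs : List Char) (l : Nat) : Int :=
  if h : l ≥ cs.length then 1
  else
    (List.range' l (cs.length - l)).attach.foldl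
      (fun acc r =>
        if isPalA cs l r.1 then acc + solve0A cs (r.1 + 1) else acc) 0
termination_by cs.length - l
decreasing_by
  · have := r.2; rw [List.mem_range'] at this; omega

def solve (s : String) : Int := solve0A s.toList 0

-- ===== PORT B =====
-- sub == sub[::-1]  (s[::-1] is the reverse; PySem.List.slice?_none_none_neg_one)
def palB (cs : List Char) (i j : Nat) : Bool :=
  let sub := PySem.List.slice cs (some (i : Int)) (some ((j + 1 : Nat) : Int))
  sub == sub.reverse

-- one iteration of the outer loop: compute the count for the suffix s[i:] and prepend it
def stepB (cs : List Char) (acc : List Int) (i : Nat) : List Int :=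
  ((List.range' i (cs.length - i)).foldl
    (fun t j => t + (if palB cs i j then acc.getD (j - i) 0 else 0)) 0) :: acc

def solve_alt (s : String) : Int :=
  ((List.range s.toList.length).foldl
    (fun acc k => stepB s.toList acc (s.toList.length - 1 - k)) [1]).getD 0 0

-- ===== PRECONDITION & SPEC =====
def Spec_solve (s : String) (out : Int) : Prop := out = solve_alt s
instance (s : String) (out : Int) : Decidable (Spec_solve s out) := by unfold Spec_solve; infer_instance

-- ===== CLAIM (what is proved, stated in full; the proofs are below) =====
def Claim_equal_solve : Prop := ∀ (s : String), Dom_solve s → Spec_solve s (solve s)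

-- ===== LEMMAS AND PROOFS =====

theorem short_rev {α : Type} (t : List α) (h : t.length ≤ 1) : t.reverse = t := by
  match t with
  | [] => rfl
  | [a] => rfl
  | a :: b :: _ => simp at h

-- the two palindrome tests agree on in-range indices
theorem palB_eq_isPalA (cs : List Char) (r l : Nat) (hr : r < cs.length) :
    palB cs l r = isPalA cs l r := by
  induction r using Nat.strong_induction_on generalizing l with
  | _ r IH =>
    by_cases hlr : l ≥ r
    · rw [isPalA]
      simp only [hlr, if_pos]
      unfold palB
      rw [PySem.List.slice_natCast]
      show ((cs.drop l).take (r + 1 - l) == ((cs.drop l).take (r + 1 - l)).reverse) = true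
      have hlen : ((cs.drop l).take (r + 1 - l)).length ≤ 1 := by
        simp [List.length_take]; omega
      rw [short_rev _ hlen]
      simp
    · push_neg at hlr
      obtain ⟨m, rfl⟩ : ∃ m, r = m + 1 := ⟨r - 1, by omega⟩
      have hl : l < cs.length := by omega
      have hm : m < cs.length := by omega
      -- decompose the slice as cs[l] :: middle ++ [cs[m+1]]
      set X := cs.drop (l + 1) with hX
      have hXlen : X.length = cs.length - l - 1 := by simp [hX]; omega
      have hsub : PySem.List.slice cs (some (l : Int)) (some ((m + 1 + 1 : Nat) : Int))
          = cs[l] :: (X.take (m - l) ++ [cs[m+1]]) := by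
        rw [PySem.List.slice_natCast]
        rw [List.drop_eq_getElem_cons hl]
        have h1 : m + 1 + 1 - l = (m - l) + 1 + 1 := by omega
        rw [h1, List.take_succ_cons, List.take_succ]
        congr 1
        have hidx : l + 1 + (m - l) = m + 1 := by omega
        have hg : X[m - l]? = some cs[m+1] := by
          rw [hX, List.getElem?_drop, hidx, List.getElem?_eq_getElem (by omega)]
        rw [hg]
        rfl
      have hM : PySem.List.slice cs (some ((l+1 : Nat) : Int)) (some ((m + 1 : Nat) : Int))
          = X.take (m - l) := by
        rw [PySem.List.slice_natCast, hX]
        congr 1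
        omega
      set M := X.take (m - l) with hMdef
      have key : (cs[l] :: (M ++ [cs[m+1]]) = (cs[l] :: (M ++ [cs[m+1]])).reverse)
          ↔ (cs[l] = cs[m+1] ∧ M = M.reverse) := by
        rw [List.reverse_cons, List.reverse_append]
        simp only [List.reverse_singleton, List.cons_append]
        constructor
        · intro h
          obtain ⟨h1, h2⟩ := List.cons.inj h
          have h3 := List.append_inj' h2 (by simp)
          exact ⟨h1, h3.1⟩
        · rintro ⟨h1, h2⟩
          rw [← h1, ← h2]
          simp
      rw [isPalA]
      simp only [ge_iff_le, Nat.not_le.mpr hlr, Nat.add_sub_cancel, if_false]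
      rw [List.getD_eq_getElem cs ' ' hl, List.getD_eq_getElem cs ' ' (by omega : m + 1 < cs.length)]
      have hIH := IH m (by omega) (l + 1) hm
      unfold palB at hIH ⊢
      rw [hsub]
      rw [hM] at hIH
      simp only [beq_eq_decide] at hIH ⊢
      by_cases hab : cs[l] = cs[m+1]
      · rw [decide_eq_true hab]
        simp only [if_true, ← hIH]
        rw [decide_eq_decide, key]
        tauto
      · rw [decide_eq_false hab]
        simp only [Bool.false_eq_true, if_false]
        simp only [decide_eq_false_iff_not, key]
        tauto

-- the foldl in solve0A, with attach removed
theorem solve0A_eq (cs : List Char) (l : Nat) (h : l < cs.length) :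
    solve0A cs l =
      (List.range' l (cs.length - l)).foldl
        (fun acc r => if isPalA cs l r then acc + solve0A cs (r + 1) else acc) 0 := by
  rw [solve0A]
  simp [Nat.not_le.mpr h]

theorem foldl_if_push (l : List Nat) (p : Nat → Bool) (v : Nat → Int) (a : Int) :
    l.foldl (fun acc r => if p r then acc + v r else acc) a
      = l.foldl (fun acc r => acc + (if p r then v r else 0)) a := by
  induction l generalizing a with
  | nil => rfl
  | cons x xs ih =>
    simp only [List.foldl_cons]
    rw [ih]
    congr 1
    split <;> simp

theorem foldl_add_congr (l : List Nat) (f g : Nat → Int) (a : Int)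
    (h : ∀ j ∈ l, f j = g j) :
    l.foldl (fun acc r => acc + f r) a = l.foldl (fun acc r => acc + g r) a := by
  induction l generalizing a with
  | nil => rfl
  | cons x xs ih =>
    simp only [List.foldl_cons]
    rw [h x List.mem_cons_self, ih _ (fun j hj => h j (List.mem_cons_of_mem _ hj))]

-- one DP step computes solve0A at its index
theorem step_val (cs : List Char) (i : Nat) (hi : i < cs.length) :
    stepB cs ((List.range' (i + 1) (cs.length - i)).map (solve0A cs)) i
      = (List.range' i (cs.length - i + 1)).map (solve0A cs) := by
  rw [List.range'_succ, List.map_cons]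
  unfold stepB
  congr 1
  rw [solve0A_eq cs i hi, foldl_if_push]
  apply foldl_add_congr
  intro j hj
  rw [List.mem_range'] at hj
  rw [palB_eq_isPalA cs j i (by omega)]
  congr 1
  have hlt : j - i < ((List.range' (i + 1) (cs.length - i)).map (solve0A cs)).length := by
    simp; omega
  rw [List.getD_eq_getElem _ _ hlt, List.getElem_map, List.getElem_range']
  congr 1
  omega

-- after k outer iterations the DP list holds solve0A for indices n-k .. n
theorem dp_invariant (cs : List Char) (k : Nat) (hk : k ≤ cs.length) :
    (List.range k).foldl (fun acc t => stepB cs acc (cs.length - 1 - t)) [1]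
      = (List.range' (cs.length - k) (k + 1)).map (solve0A cs) := by
  induction k with
  | zero =>
    have h1 : solve0A cs cs.length = 1 := by unfold solve0A; simp
    simp [h1]
  | succ k ih =>
    rw [List.range_succ, List.foldl_append, ih (by omega), List.foldl_cons, List.foldl_nil]
    have key := step_val cs (cs.length - 1 - k) (by omega)
    have h1 : cs.length - 1 - k + 1 = cs.length - k := by omega
    have h2 : cs.length - (cs.length - 1 - k) = k + 1 := by omega
    rw [h1, h2] at key
    rw [key]
    have h3 : cs.length - 1 - k = cs.length - (k + 1) := by omega
    rw [h3]

-- ===== VERDICT (by name: the statement is the Claim_ definition above) =====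
theorem solve_spec : Claim_equal_solve := by
  intro s _
  unfold Spec_solve solve solve_alt
  rw [dp_invariant s.toList s.toList.length le_rfl]
  simp [List.range'_succ]
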